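-- pv_equiv track=rewrite | github.com/MrBrantCode/unitest_baseline | mut_generate/mist_train_cf/cf_59932/solution.py | prime_factorial_sum
-- ===== SOURCE A (Python) =====
-- import math
--
-- def prime_factorial_sum(n):
--     primes = []
--     for potentialPrime in range(2, n):
--         isPrime = True
--         for num in range(2, int(potentialPrime ** 0.5) + 1):
--             if potentialPrime % num == 0:
--                 isPrime = False
--                 break
--         if isPrime:
--             primes.append(potentialPrime)
--     result = []
--     for prime in primes:
--         result.append(prime + math.factorial(prime))
--     return result
-- ===== SOURCE B (Python) =====
-- def prime_factorial_sum(n):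
--     # One pass over 2..n-1: keep a running factorial (multiply once per number,
--     # never recompute it) and test primality against the primes found so far
--     # (only those with q*q <= p), instead of trial division by every integer.
--     primes = []
--     result = []
--     fact = 1
--     for p in range(2, n):
--         fact *= p
--         if all(p % q != 0 for q in primes if q * q <= p):
--             primes.append(p)
--             result.append(p + fact)
--     return result
-- ===== Notes on version B (the rewrite author's own statement) =====
-- stated objective: faster
-- what changed: Single pass that maintains a running factorial (one multiplication per number instead of a fresh math.factorial per prime) and tests primality by dividing only by the previously found primes q with q*q <= p, instead of trial division by every integer up to sqrt(p).
import Mathlib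
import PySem

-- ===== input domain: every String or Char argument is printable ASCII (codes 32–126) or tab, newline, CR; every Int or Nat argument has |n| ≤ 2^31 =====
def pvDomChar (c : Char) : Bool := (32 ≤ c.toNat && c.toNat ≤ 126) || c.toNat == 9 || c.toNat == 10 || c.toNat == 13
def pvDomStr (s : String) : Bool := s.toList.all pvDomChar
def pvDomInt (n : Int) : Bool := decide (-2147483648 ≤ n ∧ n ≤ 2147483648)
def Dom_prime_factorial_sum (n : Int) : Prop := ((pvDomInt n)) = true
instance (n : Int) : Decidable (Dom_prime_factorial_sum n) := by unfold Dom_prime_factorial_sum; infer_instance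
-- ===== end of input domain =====

-- B replaces A's full trial division + math.factorial per prime by a single pass that
-- keeps a running factorial and divides only by the primes found so far (faster).

-- ===== PORT A =====
-- inner 'for num in range(...)' loop with break: false as soon as a divisor is found
def pvTrialLoop (p : Int) : List Int → Bool
  | [] => true
  | d :: rest => if PySem.Int.mod p d = 0 then false else pvTrialLoop p rest

-- int(potentialPrime ** 0.5): exact integer sqrt; exact on Dom (0 ≤ p ≤ 2^31 < 2^52,
-- where Python's float sqrt followed by int() equals the integer square root)
def pvISqrt (p : Int) : Int := (Nat.sqrt p.toNat : Int)

-- math.factorial(p): exact for the nonnegative p it is applied to (p is a prime ≥ 2)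
def pvFactorial (p : Int) : Int := (Nat.factorial p.toNat : Int)

def prime_factorial_sum (n : Int) : List Int :=
  let primes := (PySem.List.pyRange 2 n 1).foldl
    (fun primes p =>
      if pvTrialLoop p (PySem.List.pyRange 2 (pvISqrt p + 1) 1) then primes ++ [p] else primes) []
  primes.foldl (fun result p => result ++ [p + pvFactorial p]) []

-- ===== PORT B =====
-- all(p % q != 0 for q in primes if q * q <= p)
def pvAllNoPrimeDiv (primes : List Int) (p : Int) : Bool :=
  primes.all (fun q => if q * q ≤ p then decide (PySem.Int.mod p q ≠ 0) else true)

def prime_factorial_sum_alt (n : Int) : List Int :=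
  let st := (PySem.List.pyRange 2 n 1).foldl
    (fun (st : List Int × List Int × Int) p =>
      let fact := st.2.2 * p
      if pvAllNoPrimeDiv st.1 p then (st.1 ++ [p], st.2.1 ++ [p + fact], fact)
      else (st.1, st.2.1, fact)) ([], [], 1)
  st.2.1

-- ===== PRECONDITION & SPEC =====
def Spec_prime_factorial_sum (n : Int) (out : List Int) : Prop := out = prime_factorial_sum_alt n
instance (n : Int) (out : List Int) : Decidable (Spec_prime_factorial_sum n out) := by unfold Spec_prime_factorial_sum; infer_instance

-- ===== CLAIM (what is proved, stated in full; the proofs are below) =====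
def Claim_equal_prime_factorial_sum : Prop := ∀ (n : Int), Dom_prime_factorial_sum n → Spec_prime_factorial_sum n (prime_factorial_sum n)

-- ===== LEMMAS AND PROOFS =====

-- A's primality test, abbreviated
def pvPredA (p : Int) : Bool := pvTrialLoop p (PySem.List.pyRange 2 (pvISqrt p + 1) 1)

theorem pvTrialLoop_eq_all (p : Int) (l : List Int) :
    pvTrialLoop p l = l.all (fun d => decide (PySem.Int.mod p d ≠ 0)) := by
  induction l with
  | nil => rfl
  | cons d rest ih =>
      simp only [pvTrialLoop, List.all_cons, ih]
      by_cases h : PySem.Int.mod p d = 0 <;> simp [h]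

theorem pvPredA_iff_prime (p : Int) (hp : 2 ≤ p) :
    pvPredA p = true ↔ Nat.Prime p.toNat := by
  have hpn : ((p.toNat : Int)) = p := Int.toNat_of_nonneg (by omega)
  have hm2 : 2 ≤ p.toNat := by omega
  rw [pvPredA, pvTrialLoop_eq_all, List.all_eq_true]
  constructor
  · intro h
    by_contra hnp
    -- the least prime factor is a divisor ≤ sqrt p
    set k := p.toNat.minFac with hk
    have hkp : k.Prime := Nat.minFac_prime (by omega)
    have hkdvd : k ∣ p.toNat := Nat.minFac_dvd _
    have hksq : k ^ 2 ≤ p.toNat := Nat.minFac_sq_le_self (by omega) hnp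
    have hksqrt : k ≤ Nat.sqrt p.toNat := (Nat.le_sqrt').mpr hksq
    have hmem : (k : Int) ∈ PySem.List.pyRange 2 (pvISqrt p + 1) 1 := by
      rw [PySem.List.mem_pyRange_one]
      have := hkp.two_le
      constructor
      · omega
      · unfold pvISqrt; omega
    have := h _ hmem
    rw [decide_eq_true_iff, Ne, PySem.Int.mod_eq_zero_iff_dvd] at this
    exact this (by rw [← hpn]; exact_mod_cast hkdvd)
  · intro hpr d hd
    rw [PySem.List.mem_pyRange_one] at hd
    rw [decide_eq_true_iff, Ne, PySem.Int.mod_eq_zero_iff_dvd]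
    intro hdvd
    have hd2 : 2 ≤ d := hd.1
    have hdsqrt : d ≤ (Nat.sqrt p.toNat : Int) := by
      have := hd.2; unfold pvISqrt at this; omega
    have hlt : Nat.sqrt p.toNat < p.toNat := Nat.sqrt_lt_self (by omega)
    have hddvd : d.toNat ∣ p.toNat := by
      rw [← Int.toNat_of_nonneg (a := d) (by omega)] at hdvd
      rw [← hpn] at hdvd
      exact_mod_cast hdvd
    rcases (Nat.Prime.eq_one_or_self_of_dvd hpr d.toNat hddvd) with h1 | h1 <;> omega

-- B's check against the primes found so far agrees with A's trial division
theorem pvAllNoPrimeDiv_eq_predA (p : Int) (hp : 2 ≤ p) :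
    pvAllNoPrimeDiv ((PySem.List.pyRange 2 p 1).filter pvPredA) p = pvPredA p := by
  have hpn : ((p.toNat : Int)) = p := Int.toNat_of_nonneg (by omega)
  have hmem : ∀ q : Int, q ∈ (PySem.List.pyRange 2 p 1).filter pvPredA ↔
      (2 ≤ q ∧ q < p ∧ Nat.Prime q.toNat) := by
    intro q
    rw [List.mem_filter, PySem.List.mem_pyRange_one]
    constructor
    · rintro ⟨⟨h1, h2⟩, h3⟩
      exact ⟨h1, h2, (pvPredA_iff_prime q h1).mp h3⟩
    · rintro ⟨h1, h2, h3⟩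
      exact ⟨⟨h1, h2⟩, (pvPredA_iff_prime q h1).mpr h3⟩
  by_cases hpr : Nat.Prime p.toNat
  · rw [(pvPredA_iff_prime p hp).mpr hpr]
    rw [pvAllNoPrimeDiv, List.all_eq_true]
    intro q hq
    rw [hmem] at hq
    obtain ⟨h1, h2, h3⟩ := hq
    split_ifs with hsq
    · rw [decide_eq_true_iff, Ne, PySem.Int.mod_eq_zero_iff_dvd]
      intro hdvd
      have hqdvd : q.toNat ∣ p.toNat := by
        rw [← Int.toNat_of_nonneg (a := q) (by omega), ← hpn] at hdvd
        exact_mod_cast hdvd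
      rcases Nat.Prime.eq_one_or_self_of_dvd hpr q.toNat hqdvd with h | h <;> omega
    · rfl
  · have hfalse : pvPredA p = false := by
      rw [← Bool.not_eq_true, pvPredA_iff_prime p hp]; exact hpr
    rw [hfalse, ← Bool.not_eq_true, pvAllNoPrimeDiv, List.all_eq_true]
    intro hall
    set k := p.toNat.minFac with hk
    have hkp : k.Prime := Nat.minFac_prime (by omega)
    have hkdvd : k ∣ p.toNat := Nat.minFac_dvd _
    have hksq : k ^ 2 ≤ p.toNat := Nat.minFac_sq_le_self (by omega) hpr
    have hk2 := hkp.two_le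
    have hklt : k < p.toNat := by
      have := Nat.sqrt_lt_self (n := p.toNat) (by omega)
      have := (Nat.le_sqrt').mpr hksq
      omega
    have hkmem : (k : Int) ∈ (PySem.List.pyRange 2 p 1).filter pvPredA := by
      rw [hmem]
      refine ⟨by omega, by omega, ?_⟩
      simpa using hkp
    have := hall _ hkmem
    have hsq : (k : Int) * (k : Int) ≤ p := by
      have : k * k ≤ p.toNat := by nlinarith
      rw [← hpn]; exact_mod_cast this
    rw [if_pos hsq, decide_eq_true_iff, Ne, PySem.Int.mod_eq_zero_iff_dvd] at this
    exact this (by rw [← hpn]; exact_mod_cast hkdvd)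

-- B's fold invariant over range(2, b)
theorem pvFoldB_inv (b : Int) (hb : 2 ≤ b) :
    (PySem.List.pyRange 2 b 1).foldl
      (fun (st : List Int × List Int × Int) p =>
        let fact := st.2.2 * p
        if pvAllNoPrimeDiv st.1 p then (st.1 ++ [p], st.2.1 ++ [p + fact], fact)
        else (st.1, st.2.1, fact)) ([], [], 1)
    = ((PySem.List.pyRange 2 b 1).filter pvPredA,
       ((PySem.List.pyRange 2 b 1).filter pvPredA).map (fun p => p + pvFactorial p),
       pvFactorial (b - 1)) := by
  induction b, hb using Int.le_induction with
  | base =>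
      rw [PySem.List.pyRange_one_eq_nil (by omega)]
      simp [pvFactorial]
  | succ b hb ih =>
      rw [PySem.List.pyRange_one_succ_right (by omega), List.foldl_append, ih,
          List.filter_append, List.map_append]
      have hfact : pvFactorial (b - 1) * b = pvFactorial b := by
        unfold pvFactorial
        have h1 : b.toNat = (b - 1).toNat + 1 := by omega
        rw [h1, Nat.factorial_succ]
        push_cast
        have h2 : ((b - 1).toNat : Int) + 1 = b := by omega
        rw [h2]; ring
      simp only [List.foldl_cons, List.foldl_nil]
      rw [pvAllNoPrimeDiv_eq_predA b hb, hfact]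
      have hsucc : b + 1 - 1 = b := by ring
      rw [hsucc]
      by_cases hA : pvPredA b
      · simp [hA]
      · simp [hA]

theorem prime_factorial_sum_eq (n : Int) :
    prime_factorial_sum n = prime_factorial_sum_alt n := by
  unfold prime_factorial_sum prime_factorial_sum_alt
  by_cases hn : 2 ≤ n
  · rw [pvFoldB_inv n hn]
    simp only
    rw [PySem.List.foldl_append_if_eq_filter, PySem.List.foldl_append_singleton_eq_map,
        show (fun p => pvTrialLoop p (PySem.List.pyRange 2 (pvISqrt p + 1) 1)) = pvPredA from rfl]
    simp
  · rw [PySem.List.pyRange_one_eq_nil (by omega)]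
    rfl

-- ===== VERDICT (by name: the statement is the Claim_ definition above) =====
theorem prime_factorial_sum_spec : Claim_equal_prime_factorial_sum := by
  intro n _
  unfold Spec_prime_factorial_sum
  exact prime_factorial_sum_eq n
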